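-- pv_equiv track=rewrite | github.com/miliar/Code_Jam_Webscraper | solutions_python/Problem_177/4173.py | agregarNuevos
-- ===== SOURCE A (Python) =====
-- def agregarNuevos(contenidos, nuevo):
--     contenidos_list = list(contenidos)
--     nuevos_list = list(nuevo)
--     for valor in nuevos_list:
--         if valor not in contenidos_list:
--             contenidos += valor
--             contenidos_list += valor
--     return contenidos
-- ===== SOURCE B (Python) =====
-- def agregarNuevos(contenidos, nuevo):
--     missing = set(nuevo) - set(contenidos)
--     return contenidos + ''.join(sorted(missing, key=nuevo.index))
-- ===== Notes on version B (the rewrite author's own statement) =====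
-- stated objective: faster
-- what changed: Replaces A's stateful append loop (which re-scans a growing membership list per character) by a set difference set(nuevo)-set(contenidos) followed by sorting the missing characters by their first-occurrence index in nuevo; correct because the characters A appends are exactly the missing ones in first-occurrence order, and nuevo.index is injective on set(nuevo), so the sort reconstructs that order independently of set iteration order.
import Mathlib
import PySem

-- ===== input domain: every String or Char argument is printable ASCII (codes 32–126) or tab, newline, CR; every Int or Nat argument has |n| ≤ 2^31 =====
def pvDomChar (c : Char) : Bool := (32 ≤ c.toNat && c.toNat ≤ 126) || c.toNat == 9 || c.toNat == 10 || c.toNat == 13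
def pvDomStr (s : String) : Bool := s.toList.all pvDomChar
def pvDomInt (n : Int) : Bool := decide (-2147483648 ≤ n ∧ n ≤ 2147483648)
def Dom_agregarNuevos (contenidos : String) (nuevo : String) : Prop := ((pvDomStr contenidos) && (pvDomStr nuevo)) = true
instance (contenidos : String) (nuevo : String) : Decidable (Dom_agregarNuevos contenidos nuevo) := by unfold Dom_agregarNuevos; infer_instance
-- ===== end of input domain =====

-- B replaces A's stateful append loop by set difference set(nuevo)-set(contenidos)
-- plus a sort of the missing characters by their first-occurrence index in nuevo (objective: alternative algorithm).

-- ===== PORT A =====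
-- the for-loop over nuevos_list with its two pieces of state (contenidos, contenidos_list)
def agregarNuevosGo : List Char → String → List Char → String
  | [], cont, _ => cont
  | v :: rest, cont, lst =>
    if lst.contains v then agregarNuevosGo rest cont lst
    else agregarNuevosGo rest (cont.push v) (lst ++ [v])

def agregarNuevos (contenidos : String) (nuevo : String) : String :=
  agregarNuevosGo nuevo.toList contenidos contenidos.toList

-- ===== PORT B =====
-- missing = set(nuevo) - set(contenidos); sorted(missing, key=nuevo.index) — the key is
-- injective on set(nuevo) (distinct chars have distinct first indices), so the sort's
-- result does not depend on the set's iteration order.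
def agregarNuevos_alt (contenidos : String) (nuevo : String) : String :=
  let missing : PySem.Set Char :=
    PySem.Set.diff (PySem.Set.ofList nuevo.toList) (PySem.Set.ofList contenidos.toList)
  contenidos ++ String.ofList
    (PySem.List.sorted missing (fun c => (PySem.List.index? nuevo.toList c).getD 0) false)

-- ===== PRECONDITION & SPEC =====
def Spec_agregarNuevos (contenidos : String) (nuevo : String) (out : String) : Prop := out = agregarNuevos_alt contenidos nuevo
instance (contenidos : String) (nuevo : String) (out : String) : Decidable (Spec_agregarNuevos contenidos nuevo out) := by unfold Spec_agregarNuevos; infer_instance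

-- ===== CLAIM (what is proved, stated in full; the proofs are below) =====
def Claim_equal_agregarNuevos : Prop := ∀ (contenidos : String) (nuevo : String), Dom_agregarNuevos contenidos nuevo → Spec_agregarNuevos contenidos nuevo (agregarNuevos contenidos nuevo)

-- ===== LEMMAS AND PROOFS =====

-- the sequence of characters A's loop appends, as a pure list function
def pvAdded : List Char → List Char → List Char
  | [], _ => []
  | v :: rest, lst =>
    if lst.contains v then pvAdded rest lst else v :: pvAdded rest (lst ++ [v])

theorem pvGo_eq_append (rest : List Char) :
    ∀ (cont : String) (lst : List Char),
      agregarNuevosGo rest cont lst = cont ++ String.ofList (pvAdded rest lst) := by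
  induction rest with
  | nil =>
    intro cont lst
    apply String.toList_injective
    simp [agregarNuevosGo, pvAdded]
  | cons v rest ih =>
    intro cont lst
    simp only [agregarNuevosGo, pvAdded]
    split
    · exact ih cont lst
    · rw [ih]
      apply String.toList_injective
      simp [String.toList_ofList]

theorem pvAdded_foldl (rest : List Char) :
    ∀ lst : List Char, lst ++ pvAdded rest lst = rest.foldl PySem.Set.add lst := by
  induction rest with
  | nil => intro lst; simp [pvAdded]
  | cons v rest ih =>
    intro lst
    simp only [pvAdded, List.foldl_cons]
    by_cases hv : v ∈ lst
    · rw [if_pos (by simpa using hv), PySem.Set.add_of_mem hv]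
      exact ih lst
    · rw [if_neg (by simpa using hv), PySem.Set.add_of_not_mem hv]
      rw [← ih (lst ++ [v])]
      simp

theorem pvFoldl_filter (rest : List Char) (lst : List Char) :
    ∀ acc : List Char,
      rest.foldl PySem.Set.add (lst ++ acc)
        = lst ++ (rest.filter (fun c => !(lst.contains c))).foldl PySem.Set.add acc := by
  induction rest with
  | nil => intro acc; simp
  | cons v rest ih =>
    intro acc
    by_cases hv : v ∈ lst
    · have hc : lst.contains v = true := by simpa using hv
      have hadd : PySem.Set.add (lst ++ acc) v = lst ++ acc :=
        PySem.Set.add_of_mem (by simp [hv])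
      simp [hv, ih]
    · have hc : lst.contains v = false := by simpa using hv
      have hadd : PySem.Set.add (lst ++ acc) v = lst ++ PySem.Set.add acc v := by
        by_cases ha : v ∈ acc
        · rw [PySem.Set.add_of_mem (by simp [ha]), PySem.Set.add_of_mem ha]
        · rw [PySem.Set.add_of_not_mem (by simp [hv, ha]), PySem.Set.add_of_not_mem ha]
          simp
      simp only [List.filter_cons, hc, Bool.not_false, if_pos, List.foldl_cons]
      rw [hadd, ih (PySem.Set.add acc v)]

theorem pvAdded_eq_dedup (rest lst : List Char) :
    pvAdded rest lst = PySem.List.dedup (rest.filter (fun c => !(lst.contains c))) := by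
  have h1 := pvAdded_foldl rest lst
  have h2 := pvFoldl_filter rest lst []
  simp only [List.append_nil] at h2
  rw [h2] at h1
  have := List.append_cancel_left h1
  rw [this, PySem.List.dedup_eq_ofList, PySem.Set.ofList_eq_foldl]

-- ordered dedup commutes with a pointwise filter
theorem pvOfList_filter (p : Char → Bool) (xs : List Char) :
    PySem.Set.ofList (xs.filter p) = (PySem.Set.ofList xs).filter p := by
  induction xs using List.reverseRecOn with
  | nil => simp
  | append_singleton xs x ih =>
    rw [List.filter_append, PySem.Set.ofList_append_singleton]
    by_cases hp : p x = true
    · simp only [List.filter_cons, hp, if_pos, List.filter_nil]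
      rw [PySem.Set.ofList_append_singleton, ih]
      by_cases hx : x ∈ PySem.Set.ofList xs
      · rw [PySem.Set.add_of_mem hx, PySem.Set.add_of_mem (by simp [List.mem_filter, hx, hp])]
      · rw [PySem.Set.add_of_not_mem hx,
            PySem.Set.add_of_not_mem (fun h => hx (List.mem_filter.mp h).1)]
        simp [List.filter_append, hp]
    · simp only [List.filter_cons, hp]
      simp only [Bool.false_eq_true, if_false, List.filter_nil, List.append_nil]
      rw [ih]
      by_cases hx : x ∈ PySem.Set.ofList xs
      · rw [PySem.Set.add_of_mem hx]
      · rw [PySem.Set.add_of_not_mem hx]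
        simp [List.filter_append, hp]

-- the ordered dedup of xs is strictly increasing in first-occurrence index
theorem pvPairwise_idx (xs : List Char) :
    (PySem.Set.ofList xs).Pairwise
      (fun a b => (PySem.List.index? xs a).getD 0 < (PySem.List.index? xs b).getD 0) := by
  induction xs using List.reverseRecOn with
  | nil => simp
  | append_singleton xs x ih =>
    rw [PySem.Set.ofList_append_singleton]
    by_cases hx : x ∈ PySem.Set.ofList xs
    · rw [PySem.Set.add_of_mem hx]
      refine ih.imp_of_mem ?_
      intro a b ha hb h
      have ha' : a ∈ xs := (PySem.Set.mem_ofList xs a).mp ha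
      have hb' : b ∈ xs := (PySem.Set.mem_ofList xs b).mp hb
      rwa [PySem.List.index?_append_of_mem [x] ha', PySem.List.index?_append_of_mem [x] hb']
    · have hx' : x ∉ xs := fun h => hx ((PySem.Set.mem_ofList xs x).mpr h)
      rw [PySem.Set.add_of_not_mem hx]
      rw [List.pairwise_append]
      refine ⟨?_, by simp, ?_⟩
      · refine ih.imp_of_mem ?_
        intro a b ha hb h
        have ha' : a ∈ xs := (PySem.Set.mem_ofList xs a).mp ha
        have hb' : b ∈ xs := (PySem.Set.mem_ofList xs b).mp hb
        rwa [PySem.List.index?_append_of_mem [x] ha', PySem.List.index?_append_of_mem [x] hb']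
      · intro a ha b hb
        rw [List.mem_singleton] at hb
        rw [hb]
        have ha' : a ∈ xs := (PySem.Set.mem_ofList xs a).mp ha
        rw [PySem.List.index?_append_of_mem [x] ha',
            PySem.List.index?_append_singleton_self xs x hx']
        have hk : ∃ k, PySem.List.index? xs a = some k ∧ k < xs.length := by
          rcases Option.isSome_iff_exists.mp
            ((PySem.List.index?_isSome_iff xs a).mpr ha') with ⟨k, hk⟩
          obtain ⟨hklt, _, _⟩ := PySem.List.getElem_of_index?_eq_some hk
          exact ⟨k, hk, hklt⟩
        rcases hk with ⟨k, hk, hlt⟩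
        have hk' : List.idxOf? a xs = some k := by
          rw [← PySem.List.index?_eq_idxOf?]; exact hk
        simp [hk', hlt]

-- ===== VERDICT (by name: the statement is the Claim_ definition above) =====
theorem agregarNuevos_spec : Claim_equal_agregarNuevos := by
  intro contenidos nuevo _
  simp only [Spec_agregarNuevos, agregarNuevos, agregarNuevos_alt]
  rw [pvGo_eq_append, pvAdded_eq_dedup]
  set nl := nuevo.toList
  set cl := contenidos.toList
  set p : Char → Bool := fun c => !(cl.contains c) with hp
  have hdedup : PySem.List.dedup (nl.filter p) = (PySem.Set.ofList nl).filter p := by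
    rw [PySem.List.dedup_eq_ofList, pvOfList_filter]
  rw [hdedup]
  congr 1
  congr 1
  -- sorted(missing, key) equals the filtered ordered dedup
  refine (PySem.List.sorted_eq_of_perm_of_pairwise_lt _ _ _ ?_ ?_).symm
  · -- Perm: both Nodup with the same members
    apply (List.perm_ext_iff_of_nodup ?_ ?_).mpr
    · intro c
      rw [List.mem_filter, PySem.Set.mem_ofList,
          PySem.Set.mem_diff, PySem.Set.mem_ofList, PySem.Set.mem_ofList]
      simp [hp]
    · exact (PySem.Set.nodup_ofList nl).filter p
    · exact PySem.Set.nodup_diff _ _ (PySem.Set.nodup_ofList nl)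
  · exact List.Pairwise.sublist List.filter_sublist (pvPairwise_idx nl)
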